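-- pv_equiv track=rewrite | github.com/aibes1001/examen_python | wordle.py | print_word
-- ===== SOURCE A (Python) =====
-- def print_word(word, same_position, same_letter):
--     """Dada una palabra, una lista same_position y otra lista same_letter, esta función creará un string donde aparezcan en mayúsculas las letras de la palabra que ocupen las posiciones de same_position, en minúsculas las letras de la palabra que ocupen las posiciones de same_letter y un guión (-) en el resto de posiciones
--     Args:
--       word: Una palabra. Ej. "CAMPO"
--       same_letter_position: Lista de posiciones. Ej. [0]
--       same_letter: Lista de posiciones. Ej. [1,2]
--     Returns:
--       transformed: La palabra aplicando las transformaciones. En el caso anterior: "Cam--"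
--     """
--     transformed = ""
--
--     for i in range(len(word)):
--       if same_position.count(i) == 1:
--         transformed += word[i].upper()
--       elif same_letter.count(i) == 1:
--         transformed += word[i].lower()
--       else:
--         transformed += "-"
--
--     return transformed
-- ===== SOURCE B (Python) =====
-- def print_word(word, same_position, same_letter):
--     res = ['-'] * len(word)
--     pos_count = {}
--     for i in same_position:
--         pos_count[i] = pos_count.get(i, 0) + 1
--     for i, c in pos_count.items():
--         if c == 1 and 0 <= i < len(word):
--             res[i] = word[i].upper()
--     let_count = {}
--     for i in same_letter:
--         let_count[i] = let_count.get(i, 0) + 1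
--     for i, c in let_count.items():
--         if c == 1 and 0 <= i < len(word) and res[i] == '-':
--             res[i] = word[i].lower()
--     return ''.join(res)
-- ===== Notes on version B (the rewrite author's own statement) =====
-- stated objective: alternative
-- what changed: Instead of scanning each word index and calling list.count on both membership lists per position (quadratic), B seeds a '-' buffer, builds count dictionaries of each membership list once, and scatters uppercase/lowercase letters into the buffer by iterating the dictionaries' items, with position writes taking priority via a still-dash check.
import Mathlib
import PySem

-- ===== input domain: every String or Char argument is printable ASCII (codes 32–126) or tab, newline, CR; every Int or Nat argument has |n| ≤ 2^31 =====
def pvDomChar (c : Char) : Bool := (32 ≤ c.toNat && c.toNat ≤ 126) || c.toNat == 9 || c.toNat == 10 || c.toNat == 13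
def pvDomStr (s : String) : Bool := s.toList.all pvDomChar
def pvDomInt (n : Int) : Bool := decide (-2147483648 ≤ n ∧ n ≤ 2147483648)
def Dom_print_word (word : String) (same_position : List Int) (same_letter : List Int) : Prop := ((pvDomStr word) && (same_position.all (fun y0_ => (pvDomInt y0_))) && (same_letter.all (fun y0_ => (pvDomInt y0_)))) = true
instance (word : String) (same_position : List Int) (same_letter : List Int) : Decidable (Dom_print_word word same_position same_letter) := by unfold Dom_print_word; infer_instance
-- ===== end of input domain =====

-- B replaces A's per-index scan with count-lists (quadratic) by one-pass count dictionaries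
-- scattered into a '-' buffer (alternative decomposition; asymptotically fewer list scans).


-- ===== PORT A =====
-- literal port of A: for i in range(len(word)): append upper / lower / '-' by list.count checks
def print_word (word : String) (same_position : List Int) (same_letter : List Int) : String :=
  let cs := word.toList
  String.ofList <|
    (PySem.List.pyRange 0 (PySem.Str.len word) 1).foldl
      (fun transformed i =>
        if PySem.List.count same_position i = 1 then
          transformed ++ PySem.Chars.upper [PySem.List.pyGetD cs i ' ']
        else if PySem.List.count same_letter i = 1 then
          transformed ++ PySem.Chars.lower [PySem.List.pyGetD cs i ' ']
        else
          transformed ++ ['-']) []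

-- ===== PORT B =====
-- literal port of B (Source B): '-' buffer, two hand-rolled count dicts, two scatter passes
def print_word_alt (word : String) (same_position : List Int) (same_letter : List Int) : String :=
  let cs := word.toList
  let n : Int := PySem.Str.len word
  let res0 : List Char := List.replicate cs.length '-'
  let pos_count := same_position.foldl (fun d x => d.insert x (d.getD x 0 + 1)) (PySem.Dict.empty : PySem.Dict Int Int)
  let res1 := pos_count.items.foldl
    (fun res p =>
      if p.2 = 1 ∧ 0 ≤ p.1 ∧ p.1 < n then
        res.set p.1.toNat (PySem.Chars.upperChar (PySem.List.pyGetD cs p.1 ' '))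
      else res) res0
  let let_count := same_letter.foldl (fun d x => d.insert x (d.getD x 0 + 1)) (PySem.Dict.empty : PySem.Dict Int Int)
  let res2 := let_count.items.foldl
    (fun res p =>
      if p.2 = 1 ∧ 0 ≤ p.1 ∧ p.1 < n ∧ res.getD p.1.toNat '*' = '-' then
        res.set p.1.toNat (PySem.Chars.lowerChar (PySem.List.pyGetD cs p.1 ' '))
      else res) res1
  String.ofList res2

-- ===== PRECONDITION & SPEC =====
def Spec_print_word (word : String) (same_position : List Int) (same_letter : List Int) (out : String) : Prop := out = print_word_alt word same_position same_letter
instance (word : String) (same_position : List Int) (same_letter : List Int) (out : String) : Decidable (Spec_print_word word same_position same_letter out) := by unfold Spec_print_word; infer_instance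

-- ===== CLAIM (what is proved, stated in full; the proofs are below) =====
def Claim_equal_print_word : Prop := ∀ (word : String) (same_position : List Int) (same_letter : List Int), Dom_print_word word same_position same_letter → Spec_print_word word same_position same_letter (print_word word same_position same_letter)

-- ===== LEMMAS AND PROOFS =====

-- A's per-index character
def pvRuleA (cs : List Char) (sp sl : List Int) (j : Nat) : Char :=
  if PySem.List.count sp (j : Int) = 1 then PySem.Chars.upperChar (cs.getD j ' ')
  else if PySem.List.count sl (j : Int) = 1 then PySem.Chars.lowerChar (cs.getD j ' ')
  else '-'

-- ASCII-independent: an uppercased char can only be '-' if it was '-' itself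
theorem pv_upperChar_dash {c : Char} (h : PySem.Chars.upperChar c = '-') :
    PySem.Chars.lowerChar c = '-' := by
  unfold PySem.Chars.upperChar at h
  split at h
  · next hl =>
    exfalso
    unfold PySem.Chars.islower at hl
    simp only [Bool.and_eq_true, decide_eq_true_eq, Char.le_def, UInt32.le_iff_toNat_le] at hl
    have h1 : 97 ≤ c.toNat := hl.1
    have h2 : c.toNat ≤ 122 := hl.2
    have h3 := congrArg Char.toNat h
    rw [Char.toNat_ofNat, if_pos (Or.inl (by omega))] at h3
    have h4 : c.toNat - 32 = 45 := h3
    omega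
  · subst h; decide

-- generic scatter step: write g k at slot k when C k (current slot value) holds
def pvStep (n : Int) (C : Int → Char → Prop) [∀ k v, Decidable (C k v)]
    (g : Int → Char) (res : List Char) (k : Int) : List Char :=
  if 0 ≤ k ∧ k < n ∧ C k (res.getD k.toNat '*') then res.set k.toNat (g k) else res

theorem pvScatter_length (n : Int) (C : Int → Char → Prop) [∀ k v, Decidable (C k v)]
    (g : Int → Char) (K : List Int) (res : List Char) :
    (K.foldl (pvStep n C g) res).length = res.length := by
  induction K generalizing res with
  | nil => rfl
  | cons k K ih => simp only [List.foldl_cons, pvStep]; split <;> simp [ih]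

theorem pvStep_length (n : Int) (C : Int → Char → Prop) [∀ k v, Decidable (C k v)]
    (g : Int → Char) (res : List Char) (k : Int) :
    (pvStep n C g res k).length = res.length := by
  unfold pvStep; split <;> simp

theorem pv_getD_set_self {res : List Char} {j : Nat} (hlt : j < res.length) (v d : Char) :
    (res.set j v).getD j d = v := by
  simp [List.getD, hlt]

theorem pv_getD_set_ne {i j : Nat} (h : i ≠ j) (res : List Char) (v d : Char) :
    (res.set i v).getD j d = res.getD j d := by
  simp [List.getD, List.getElem?_set_ne h]

theorem pvScatter_getD (n : Int) (C : Int → Char → Prop) [∀ k v, Decidable (C k v)]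
    (g : Int → Char) (K : List Int) (hK : K.Nodup) (res : List Char)
    (hres : (res.length : Int) = n) (j : Nat) (hj : (j : Int) < n) :
    (K.foldl (pvStep n C g) res).getD j '*' =
      if (j : Int) ∈ K ∧ C (j : Int) (res.getD j '*') then g (j : Int) else res.getD j '*' := by
  induction K generalizing res with
  | nil => simp
  | cons k K ih =>
    obtain ⟨hk, hKnd⟩ := List.nodup_cons.mp hK
    have hlt : j < res.length := by exact_mod_cast hres ▸ hj
    simp only [List.foldl_cons]
    by_cases hkj : k = (j : Int)
    · subst hkj
      by_cases hc : C (j : Int) (res.getD j '*')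
      · have hstep : pvStep n C g res (j : Int) = res.set j (g (j : Int)) := by
          unfold pvStep
          rw [if_pos ⟨Int.natCast_nonneg j, hj, by simpa using hc⟩, Int.toNat_natCast]
        rw [hstep, ih hKnd _ (by simpa using hres)]
        rw [if_neg (fun h => hk h.1), pv_getD_set_self hlt,
            if_pos ⟨List.mem_cons_self, hc⟩]
      · have hstep : pvStep n C g res (j : Int) = res := by
          unfold pvStep
          rw [if_neg (fun h => hc (by simpa using h.2.2))]
        rw [hstep, ih hKnd _ hres]
        have hcond1 : ¬((j : Int) ∈ K ∧ C (j : Int) (res.getD j '*')) := fun h => hc h.2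
        have hcond2 : ¬((j : Int) ∈ (j : Int) :: K ∧ C (j : Int) (res.getD j '*')) := fun h => hc h.2
        rw [if_neg hcond1, if_neg hcond2]
    · have hsame : (pvStep n C g res k).getD j '*' = res.getD j '*' := by
        unfold pvStep; split
        · next hcond => exact pv_getD_set_ne (by omega) res _ _
        · rfl
      rw [ih hKnd _ (by rw [pvStep_length]; exact hres), hsame]
      have hmem : ((j : Int) ∈ k :: K) = ((j : Int) ∈ K) := by
        apply propext
        constructor
        · intro h
          rcases List.mem_cons.mp h with he | hm
          · exact absurd he.symm hkj
          · exact hm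
        · exact fun h => List.mem_cons_of_mem _ h
      simp only [hmem]

theorem pvA_eq (word : String) (sp sl : List Int) :
    print_word word sp sl
      = String.ofList ((List.range word.toList.length).map (pvRuleA word.toList sp sl)) := by
  unfold print_word
  simp only []
  have hstep : (fun (t : List Char) (i : Int) =>
      if PySem.List.count sp i = 1 then t ++ PySem.Chars.upper [PySem.List.pyGetD word.toList i ' ']
      else if PySem.List.count sl i = 1 then t ++ PySem.Chars.lower [PySem.List.pyGetD word.toList i ' ']
      else t ++ ['-'])
    = (fun t i => t ++ (if PySem.List.count sp i = 1 then PySem.Chars.upper [PySem.List.pyGetD word.toList i ' ']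
      else if PySem.List.count sl i = 1 then PySem.Chars.lower [PySem.List.pyGetD word.toList i ' ']
      else ['-'])) := by
    funext t i; split_ifs <;> rfl
  rw [hstep, PySem.List.foldl_append_eq_flatMap, List.nil_append, PySem.Str.len_eq,
      PySem.List.pyRange_one]
  congr 1
  rw [List.flatMap_map]
  simp only [Int.sub_zero, Int.toNat_natCast, Int.zero_add,
    List.map_eq_flatMap]
  apply List.flatMap_congr
  intro x hx
  simp only [PySem.Chars.upper, PySem.Chars.lower, PySem.List.pyGetD_natCast, List.map,
    pvRuleA]
  split_ifs <;> rfl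

theorem pvB_eq (word : String) (sp sl : List Int) :
    print_word_alt word sp sl
      = String.ofList ((List.range word.toList.length).map (pvRuleA word.toList sp sl)) := by
  unfold print_word_alt
  simp only []
  rw [PySem.Dict.foldl_insert_getD_add_one_eq_counter,
      PySem.Dict.foldl_insert_getD_add_one_eq_counter,
      PySem.Dict.items_counter, PySem.Dict.items_counter, List.foldl_map, List.foldl_map]
  set cs := word.toList with hcs
  have hn : PySem.Str.len word = (cs.length : Int) := PySem.Str.len_eq word
  have e1 : (fun (res : List Char) (k : Int) =>
      if ((List.count k sp : Int)) = 1 ∧ 0 ≤ k ∧ k < PySem.Str.len word then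
        res.set k.toNat (PySem.Chars.upperChar (PySem.List.pyGetD cs k ' '))
      else res)
    = pvStep (PySem.Str.len word) (fun k _ => ((List.count k sp : Int)) = 1)
        (fun k => PySem.Chars.upperChar (PySem.List.pyGetD cs k ' ')) := by
    funext res k
    unfold pvStep
    by_cases h1 : ((List.count k sp : Int)) = 1 <;>
      by_cases h2 : 0 ≤ k <;> by_cases h3 : k < PySem.Str.len word <;> simp [h1, h2]
  have e2 : (fun (res : List Char) (k : Int) =>
      if ((List.count k sl : Int)) = 1 ∧ 0 ≤ k ∧ k < PySem.Str.len word ∧ res.getD k.toNat '*' = '-' then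
        res.set k.toNat (PySem.Chars.lowerChar (PySem.List.pyGetD cs k ' '))
      else res)
    = pvStep (PySem.Str.len word) (fun k v => ((List.count k sl : Int)) = 1 ∧ v = '-')
        (fun k => PySem.Chars.lowerChar (PySem.List.pyGetD cs k ' ')) := by
    funext res k
    unfold pvStep
    by_cases h1 : ((List.count k sl : Int)) = 1 <;> by_cases h2 : 0 ≤ k <;>
      by_cases h3 : k < PySem.Str.len word <;>
      by_cases h4 : res.getD k.toNat '*' = '-' <;> simp [h1, h2]
  rw [e1, e2]
  apply congrArg String.ofList
  have hlen0 : (((List.replicate cs.length '-').length : Nat) : Int) = PySem.Str.len word := by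
    rw [List.length_replicate, hn]
  apply List.ext_getElem
  · rw [pvScatter_length, pvScatter_length, List.length_replicate, List.length_map,
      List.length_range]
  · intro j h1 h2
    rw [List.length_map, List.length_range] at h2
    have hj : ((j : Nat) : Int) < PySem.Str.len word := by rw [hn]; exact_mod_cast h2
    rw [← List.getD_eq_getElem _ '*' h1,
        pvScatter_getD _ _ _ _ (PySem.Set.nodup_ofList sl) _ (by rw [pvScatter_length, List.length_replicate, hn]) j hj,
        pvScatter_getD _ _ _ _ (PySem.Set.nodup_ofList sp) _ hlen0 j hj,
        @List.getD_replicate Char '-' '*' j cs.length h2]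
    have hmemp : ((j : Int) ∈ PySem.Set.ofList sp ∧ ((List.count (j : Int) sp : Int)) = 1)
        ↔ List.count (j : Int) sp = 1 := by
      rw [PySem.Set.mem_ofList, Nat.cast_eq_one]
      exact ⟨fun h => h.2, fun h => ⟨List.count_pos_iff.mp (by omega), h⟩⟩
    have hmeml : ∀ v : Char, ((j : Int) ∈ PySem.Set.ofList sl ∧ (((List.count (j : Int) sl : Int)) = 1 ∧ v = '-'))
        ↔ (List.count (j : Int) sl = 1 ∧ v = '-') := by
      intro v
      rw [PySem.Set.mem_ofList, Nat.cast_eq_one]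
      exact ⟨fun h => h.2, fun h => ⟨List.count_pos_iff.mp (by omega), h⟩⟩
    rw [List.getElem_map, List.getElem_range]
    unfold pvRuleA
    rw [PySem.List.count_eq, PySem.List.count_eq, PySem.List.pyGetD_natCast]
    by_cases hp : List.count (j : Int) sp = 1 <;> by_cases hq : List.count (j : Int) sl = 1
    · rw [if_pos (hmemp.mpr hp), if_pos hp]
      by_cases hu : PySem.Chars.upperChar (cs.getD j ' ') = '-'
      · rw [if_pos ((hmeml _).mpr ⟨hq, hu⟩), pv_upperChar_dash hu, hu]
      · rw [if_neg (fun h => hu ((hmeml _).mp h).2)]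
    · rw [if_pos (hmemp.mpr hp), if_pos hp]
      rw [if_neg (fun h => hq ((hmeml _).mp h).1)]
    · rw [if_neg (fun h => hp (hmemp.mp h)), if_pos ((hmeml _).mpr ⟨hq, rfl⟩),
        if_neg hp, if_pos hq]
    · rw [if_neg (fun h => hp (hmemp.mp h)), if_neg (fun h => hq ((hmeml _).mp h).1),
        if_neg hp, if_neg hq]

-- ===== VERDICT (by name: the statement is the Claim_ definition above) =====
theorem print_word_spec : Claim_equal_print_word := by
  intro word same_position same_letter _
  unfold Spec_print_word
  rw [pvA_eq, pvB_eq]
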